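-- pv_equiv track=rewrite | github.com/biowpn/MinimalCFG | mincfg/mincfg.py | eliminate_e_rules
-- ===== SOURCE A (Python) =====
-- def reverse_closure_e(G):
--     '''
--     get the set of nonterminals that may derive empty string ''
--     '''
--     nt_s = {''}
--     done = False
--     while not done:
--         done = True
--         for nt, subs in G:
--             if all([s in nt_s for s in subs]) and nt not in nt_s:
--                 nt_s.add(nt)
--                 done = False
--     nt_s.remove('')
--     return nt_s
--
-- def eliminate_e_rules(G):
--     '''
--     e-rules:
--         A -> ''
--     assuming long rules have been eliminated.
--     '''
--     grammar = []
--     e = reverse_closure_e(G)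
--
--     for nt, subs in G:
--         if len(subs) == 1:
--             if subs[0] != '':
--                 grammar.append((nt, subs))
--         elif len(subs) == 2:
--             if subs[0] in e and nt != subs[1]:
--                 grammar.append((nt, [subs[1]]))
--             if subs[1] in e and nt != subs[0]:
--                 grammar.append((nt, [subs[0]]))
--             grammar.append((nt, subs))
--     return grammar
-- ===== SOURCE B (Python) =====
-- def eliminate_e_rules(G):
--     '''
--     e-rules:
--         A -> ''
--     assuming long rules have been eliminated.
--     Worklist version: nullable nonterminals found by counter-based propagation
--     (each rule keeps the number of its symbols not yet known nullable), then each
--     rule is expanded independently.  '' is epsilon, never a nonterminal, so it is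
--     counted as trivially nullable but never enters the nullable set.
--     '''
--     nullable = set()
--     occurs = {}        # symbol -> rule indices, one entry per occurrence
--     count = []         # per rule: symbols not yet known nullable
--     stack = []
--     for i, (nt, subs) in enumerate(G):
--         rem = 0
--         for s in subs:
--             if s != '':
--                 rem += 1
--                 occurs.setdefault(s, []).append(i)
--         count.append(rem)
--         if rem == 0 and nt != '' and nt not in nullable:
--             nullable.add(nt)
--             stack.append(nt)
--     while stack:
--         s = stack.pop()
--         for i in occurs.get(s, []):
--             count[i] -= 1
--             if count[i] == 0:
--                 nt = G[i][0]
--                 if nt != '' and nt not in nullable: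
--                     nullable.add(nt)
--                     stack.append(nt)
--
--     def expand(nt, subs):
--         if len(subs) == 1:
--             return [] if subs[0] == '' else [(nt, subs)]
--         if len(subs) == 2:
--             a, b = subs
--             res = []
--             if a in nullable and nt != b:
--                 res.append((nt, [b]))
--             if b in nullable and nt != a:
--                 res.append((nt, [a]))
--             res.append((nt, subs))
--             return res
--         return []
--
--     return [p for nt, subs in G for p in expand(nt, subs)]
-- ===== Notes on version B (the rewrite author's own statement) =====
-- stated objective: alternative
-- what changed: A recomputes the nullable set by rescanning the whole grammar until a fixpoint; B finds the same set by a single-pass worklist propagation with per-rule remaining-nonnullable counters and a symbol-to-rule occurrence index, and builds the output by expanding each rule independently (flat-map) instead of growing one accumulator.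
import Mathlib
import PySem

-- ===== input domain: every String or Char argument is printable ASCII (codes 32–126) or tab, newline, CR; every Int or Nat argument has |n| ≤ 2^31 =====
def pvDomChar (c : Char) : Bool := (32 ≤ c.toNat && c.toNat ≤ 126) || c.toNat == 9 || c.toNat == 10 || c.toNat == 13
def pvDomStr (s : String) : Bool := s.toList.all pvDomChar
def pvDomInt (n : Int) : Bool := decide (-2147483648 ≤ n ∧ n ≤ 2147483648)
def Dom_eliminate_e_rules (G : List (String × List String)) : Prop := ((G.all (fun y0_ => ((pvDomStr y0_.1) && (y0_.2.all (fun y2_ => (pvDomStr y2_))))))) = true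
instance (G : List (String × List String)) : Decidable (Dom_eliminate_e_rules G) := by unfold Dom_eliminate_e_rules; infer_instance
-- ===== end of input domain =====

-- B replaces A's repeated full-grammar rescans for the nullable set by a one-pass
-- worklist propagation with per-rule remaining-counters, and expands each rule
-- independently (flatMap) instead of growing one accumulator; same return value.

-- ===== PORT A =====
-- body of the 'for nt, subs in G' loop inside reverse_closure_e
def rceStep (st : List String × Bool) (r : String × List String) : List String × Bool :=
  if (r.2.all (fun s => st.1.contains s)) && !(st.1.contains r.1) then
    (PySem.Set.add st.1 r.1, false)
  else st

-- one execution of the while-loop body (done is reset to True on entry)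
def rcePass (L : List (String × List String)) (st : List String × Bool) :
    List String × Bool :=
  L.foldl rceStep st

-- the while-loop; fuel G.length + 1 always suffices (each repeated pass adds a new head)
def rceLoop (G : List (String × List String)) : Nat → List String → List String
  | 0, S => S
  | f + 1, S =>
    let p := rcePass G (S, true)
    if p.2 then p.1 else rceLoop G f p.1

-- nt_s.remove('') : '' is always a member here, so remove = discard
def reverseClosureE (G : List (String × List String)) : List String :=
  PySem.Set.discard (rceLoop G (G.length + 1) (PySem.Set.ofList [""])) ""

def eliminate_e_rules (G : List (String × List String)) : List (String × List String) :=
  let e := reverseClosureE G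
  G.foldl (fun grammar r =>
    if r.2.length == 1 then
      if !(r.2.getD 0 "" == "") then grammar ++ [(r.1, r.2)] else grammar
    else if r.2.length == 2 then
      let g1 := if e.contains (r.2.getD 0 "") && !(r.1 == r.2.getD 1 "") then
          grammar ++ [(r.1, [r.2.getD 1 ""])] else grammar
      let g2 := if e.contains (r.2.getD 1 "") && !(r.1 == r.2.getD 0 "") then
          g1 ++ [(r.1, [r.2.getD 0 ""])] else g1
      g2 ++ [(r.1, r.2)]
    else grammar) []

-- ===== PORT B =====
-- body of Source B's phase-1 'for i, (nt, subs) in enumerate(G)' loop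
def bInitStep (st : Nat × List String × PySem.Dict String (List Nat) × List Int × List String)
    (r : String × List String) :
    Nat × List String × PySem.Dict String (List Nat) × List Int × List String :=
  let (i, nl, occ, cnt, stk) := st
  let q := r.2.foldl (fun (q : Int × PySem.Dict String (List Nat)) s =>
      if !(s == "") then (q.1 + 1, q.2.modify s [] (· ++ [i])) else q) (0, occ)
  let cnt' := cnt ++ [q.1]
  if q.1 == (0 : Int) && !(r.1 == "") && !(nl.contains r.1) then
    (i + 1, PySem.Set.add nl r.1, q.2, cnt', stk ++ [r.1])
  else (i + 1, nl, q.2, cnt', stk)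

def bInit (G : List (String × List String)) :
    Nat × List String × PySem.Dict String (List Nat) × List Int × List String :=
  G.foldl bInitStep (0, [], PySem.Dict.empty, [], [])

-- body of the inner 'for i in occurs.get(s, [])' loop of Source B's while-loop
def bInnerStep (G : List (String × List String))
    (st : List String × List Int × List String) (i : Nat) :
    List String × List Int × List String :=
  let (nl, cnt, stk) := st
  let c := cnt.getD i 0 - 1
  let cnt' := cnt.set i c
  if c == (0 : Int) then
    let nt := (G.getD i ("", [])).1
    if !(nt == "") && !(nl.contains nt) then (PySem.Set.add nl nt, cnt', stk ++ [nt])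
    else (nl, cnt', stk)
  else (nl, cnt', stk)

def bInner (G : List (String × List String)) (idxs : List Nat)
    (st : List String × List Int × List String) : List String × List Int × List String :=
  idxs.foldl (bInnerStep G) st

-- Source B's while-loop; fuel G.length + 1 always suffices (every push is a distinct head)
def bLoop (G : List (String × List String)) (occ : PySem.Dict String (List Nat)) :
    Nat → List String × List Int × List String → List String
  | 0, st => st.1
  | f + 1, st =>
    let (nl, cnt, stk) := st
    if stk.isEmpty then nl
    else
      let s := stk.getLastD ""
      bLoop G occ f (bInner G (occ.getD s []) (nl, cnt, stk.dropLast))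

-- Source B's expand helper
def bExpand (nullable : List String) (nt : String) (subs : List String) :
    List (String × List String) :=
  if subs.length == 1 then
    if subs.getD 0 "" == "" then [] else [(nt, subs)]
  else if subs.length == 2 then
    let a := subs.getD 0 ""
    let b := subs.getD 1 ""
    (if nullable.contains a && !(nt == b) then [(nt, [b])] else []) ++
    (if nullable.contains b && !(nt == a) then [(nt, [a])] else []) ++
    [(nt, subs)]
  else []

def eliminate_e_rules_alt (G : List (String × List String)) : List (String × List String) :=
  let p := bInit G
  let nullable := bLoop G p.2.2.1 (G.length + 1) (p.2.1, p.2.2.2.1, p.2.2.2.2)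
  G.flatMap (fun r => bExpand nullable r.1 r.2)

-- ===== PRECONDITION & SPEC =====
def Spec_eliminate_e_rules (G : List (String × List String)) (out : List (String × List String)) : Prop := out = eliminate_e_rules_alt G
instance (G : List (String × List String)) (out : List (String × List String)) : Decidable (Spec_eliminate_e_rules G out) := by unfold Spec_eliminate_e_rules; infer_instance

-- ===== CLAIM (what is proved, stated in full; the proofs are below) =====
def Claim_equal_eliminate_e_rules : Prop := ∀ (G : List (String × List String)), Dom_eliminate_e_rules G → Spec_eliminate_e_rules G (eliminate_e_rules G)

-- ===== LEMMAS AND PROOFS =====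

-- the nullable nonterminals: least relation containing '' and closed under the rules
inductive NulP (G : List (String × List String)) : String → Prop
  | base : NulP G ""
  | step {nt : String} {subs : List String} :
      (nt, subs) ∈ G → (∀ s ∈ subs, NulP G s) → NulP G nt

def headsF (G : List (String × List String)) : Finset String :=
  (G.map Prod.fst).toFinset

-- ---- A side: the while-loop computes exactly {''} ∪ {nt | NulP nt} ----

-- one step of a pass either appends a fresh head (setting done := False) or is the identity
lemma rceStep_cases (st : List String × Bool) (r : String × List String) :
    ((∀ s ∈ r.2, s ∈ st.1) ∧ r.1 ∉ st.1 ∧ rceStep st r = (st.1 ++ [r.1], false))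
    ∨ (((∀ s ∈ r.2, s ∈ st.1) → r.1 ∈ st.1) ∧ rceStep st r = st) := by
  unfold rceStep
  split_ifs with h
  · left
    obtain ⟨hall, hc⟩ := (Bool.and_eq_true ..).mp h
    rw [List.all_eq_true] at hall
    have hnm : r.1 ∉ st.1 := by
      intro hm
      rw [← List.contains_iff_mem] at hm
      rw [Bool.not_eq_true'] at hc
      rw [hc] at hm
      exact Bool.false_ne_true hm
    refine ⟨fun s hs => List.contains_iff_mem.mp (hall s hs), hnm, ?_⟩
    rw [PySem.Set.add_of_not_mem hnm]
  · right
    refine ⟨fun hall => ?_, rfl⟩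
    by_contra hnm
    apply h
    rw [Bool.and_eq_true]
    refine ⟨List.all_eq_true.mpr fun s hs => List.contains_iff_mem.mpr (hall s hs), ?_⟩
    rw [Bool.not_eq_true']
    exact Bool.eq_false_iff.mpr fun hc => hnm (List.contains_iff_mem.mp hc)

lemma rcePass_mono (L : List (String × List String)) :
    ∀ st, ∀ x ∈ st.1, x ∈ (rcePass L st).1 := by
  induction L with
  | nil => intro st x hx; exact hx
  | cons r L ih =>
    intro st x hx
    show x ∈ (rcePass L (rceStep st r)).1
    apply ih
    rcases rceStep_cases st r with ⟨_, _, h⟩ | ⟨_, h⟩ <;> rw [h]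
    · exact List.mem_append_left _ hx
    · exact hx

lemma rcePass_sub (L : List (String × List String)) :
    ∀ st, ∀ x ∈ (rcePass L st).1, x ∈ st.1 ∨ x ∈ L.map Prod.fst := by
  induction L with
  | nil => intro st x hx; exact Or.inl hx
  | cons r L ih =>
    intro st x hx
    rcases ih (rceStep st r) x hx with h | h
    · rcases rceStep_cases st r with ⟨_, _, he⟩ | ⟨_, he⟩ <;> rw [he] at h
      · rcases List.mem_append.mp h with h | h
        · exact Or.inl h
        · simp only [List.mem_singleton] at h
          exact Or.inr (by simp [h])
      · exact Or.inl h
    · exact Or.inr (by simp; simp at h; exact Or.inr h)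

lemma rcePass_nodup (L : List (String × List String)) :
    ∀ st, st.1.Nodup → (rcePass L st).1.Nodup := by
  induction L with
  | nil => intro st h; exact h
  | cons r L ih =>
    intro st h
    apply ih
    rcases rceStep_cases st r with ⟨_, hnm, he⟩ | ⟨_, he⟩ <;> rw [he]
    · refine h.append (List.nodup_singleton _) ?_
      intro a ha hb
      rw [List.mem_singleton] at hb
      subst hb
      exact hnm ha
    · exact h

lemma rcePass_sound (G : List (String × List String)) :
    ∀ (L : List (String × List String)), (∀ r ∈ L, r ∈ G) →
    ∀ st, (∀ x ∈ st.1, x = "" ∨ NulP G x) →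
    ∀ x ∈ (rcePass L st).1, x = "" ∨ NulP G x := by
  intro L
  induction L with
  | nil => intro _ st hst x hx; exact hst x hx
  | cons r L ih =>
    intro hL st hst
    apply ih (fun r' hr' => hL r' (List.mem_cons_of_mem _ hr'))
    intro x hx
    rcases rceStep_cases st r with ⟨hall, _, he⟩ | ⟨_, he⟩ <;> rw [he] at hx
    · rcases List.mem_append.mp hx with h | h
      · exact hst x h
      · simp only [List.mem_singleton] at h
        subst h
        refine Or.inr (NulP.step (hL r (List.mem_cons_self ..)) ?_)
        intro s hs
        rcases hst s (hall s hs) with h | h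
        · rw [h]; exact NulP.base
        · exact h
    · exact hst x hx

lemma rcePass_snd_false (L : List (String × List String)) :
    ∀ st, st.2 = false → (rcePass L st).2 = false := by
  induction L with
  | nil => intro st h; exact h
  | cons r L ih =>
    intro st h
    apply ih
    rcases rceStep_cases st r with ⟨_, _, he⟩ | ⟨_, he⟩
    · simp [he]
    · simp [he, h]

lemma rcePass_done (L : List (String × List String)) :
    ∀ st, (rcePass L st).2 = true →
    (rcePass L st).1 = st.1 ∧ st.2 = true ∧
      ∀ r ∈ L, (∀ s ∈ r.2, s ∈ st.1) → r.1 ∈ st.1 := by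
  induction L with
  | nil => intro st h; exact ⟨rfl, h, by simp⟩
  | cons r L ih =>
    intro st h
    have hre : rcePass (r :: L) st = rcePass L (rceStep st r) := rfl
    rw [hre] at h ⊢
    rcases rceStep_cases st r with ⟨_, _, he⟩ | ⟨himp, he⟩
    · rw [he] at h
      rw [rcePass_snd_false L _ rfl] at h
      exact absurd h Bool.false_ne_true
    · rw [he] at h ⊢
      obtain ⟨h1, h2, h3⟩ := ih st h
      refine ⟨h1, h2, fun r' hr' => ?_⟩
      rcases List.mem_cons.mp hr' with hr' | hr'
      · subst hr'; exact himp
      · exact h3 r' hr'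

lemma rcePass_progress (L : List (String × List String)) :
    ∀ S, (rcePass L (S, true)).2 = false →
    ∃ x, x ∈ (rcePass L (S, true)).1 ∧ x ∉ S := by
  induction L with
  | nil => intro S h; exact absurd h (by simp [rcePass])
  | cons r L ih =>
    intro S h
    rcases rceStep_cases (S, true) r with ⟨_, hnm, he⟩ | ⟨_, he⟩
    · refine ⟨r.1, ?_, hnm⟩
      have : r.1 ∈ (rceStep (S, true) r).1 := by rw [he]; simp
      exact rcePass_mono L _ _ this
    · have : rcePass (r :: L) (S, true) = rcePass L (S, true) := by
        show rcePass L (rceStep (S, true) r) = _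
        rw [he]
      rw [this] at h ⊢
      exact ih S h

lemma rceLoop_spec (G : List (String × List String)) :
    ∀ (f : Nat) (S : List String), S.Nodup → (∀ x ∈ S, x = "" ∨ NulP G x) →
    (headsF G \ S.toFinset).card < f →
    (∀ x ∈ S, x ∈ rceLoop G f S) ∧ (∀ x ∈ rceLoop G f S, x = "" ∨ NulP G x) ∧
    (∀ r ∈ G, (∀ s ∈ r.2, s ∈ rceLoop G f S) → r.1 ∈ rceLoop G f S) := by
  intro f
  induction f with
  | zero => intro S _ _ hfuel; omega
  | succ f ih =>
    intro S hnod hsound hfuel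
    show _ ∧ _ ∧ _
    rw [show rceLoop G (f + 1) S =
        (let p := rcePass G (S, true); if p.2 then p.1 else rceLoop G f p.1) from rfl]
    by_cases hd : (rcePass G (S, true)).2 = true
    · simp only [hd, if_true]
      obtain ⟨h1, _, h3⟩ := rcePass_done G (S, true) hd
      rw [h1]
      exact ⟨fun x hx => hx, hsound, h3⟩
    · rw [Bool.not_eq_true] at hd
      simp only [hd, Bool.false_eq_true, if_false]
      obtain ⟨x, hx1, hx2⟩ := rcePass_progress G S hd
      have hmono := rcePass_mono G (S, true)
      have hsub := rcePass_sub G (S, true)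
      have hfuel' : (headsF G \ (rcePass G (S, true)).1.toFinset).card < f := by
        have hss : headsF G \ (rcePass G (S, true)).1.toFinset ⊂ headsF G \ S.toFinset := by
          constructor
          · intro y hy
            rw [Finset.mem_sdiff] at hy ⊢
            refine ⟨hy.1, fun hyS => hy.2 ?_⟩
            rw [List.mem_toFinset] at hyS ⊢
            exact hmono y hyS
          · intro hsub'
            have hxh : x ∈ headsF G := by
              rcases hsub x hx1 with h | h
              · exact absurd h hx2
              · exact List.mem_toFinset.mpr h
            have : x ∈ headsF G \ S.toFinset := by
              rw [Finset.mem_sdiff, List.mem_toFinset]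
              exact ⟨hxh, hx2⟩
            have := hsub' this
            rw [Finset.mem_sdiff, List.mem_toFinset] at this
            exact this.2 hx1
        have := Finset.card_lt_card hss
        omega
      obtain ⟨g1, g2, g3⟩ := ih (rcePass G (S, true)).1
        (rcePass_nodup G (S, true) hnod)
        (rcePass_sound G G (fun r hr => hr) (S, true) hsound)
        hfuel'
      exact ⟨fun y hy => g1 y (hmono y hy), g2, g3⟩

lemma mem_rce (G : List (String × List String)) (x : String) :
    x ∈ rceLoop G (G.length + 1) (PySem.Set.ofList [""]) ↔ (x = "" ∨ NulP G x) := by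
  have hS0 : PySem.Set.ofList [""] = ([""] : List String) := rfl
  have hfuel : (headsF G \ (PySem.Set.ofList [""]).toFinset).card < G.length + 1 := by
    have h1 : (headsF G \ (PySem.Set.ofList [""]).toFinset).card ≤ (headsF G).card :=
      Finset.card_le_card (Finset.sdiff_subset)
    have h2 : (headsF G).card ≤ (G.map Prod.fst).length := List.toFinset_card_le _
    rw [List.length_map] at h2
    omega
  obtain ⟨h1, h2, h3⟩ := rceLoop_spec G (G.length + 1) (PySem.Set.ofList [""])
    (by rw [hS0]; simp) (by rw [hS0]; intro y hy; simp at hy; exact Or.inl hy) hfuel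
  constructor
  · exact h2 x
  · intro h
    rcases h with h | h
    · subst h; exact h1 "" (by rw [hS0]; simp)
    · induction h with
      | base => exact h1 "" (by rw [hS0]; simp)
      | step hmem hsubs ihs => exact h3 _ hmem (fun s hs => ihs s hs)

lemma mem_e (G : List (String × List String)) (x : String) :
    x ∈ reverseClosureE G ↔ (x ≠ "" ∧ NulP G x) := by
  unfold reverseClosureE
  rw [PySem.Set.mem_discard]
  rw [mem_rce]
  constructor
  · rintro ⟨h | h, hne⟩
    · exact absurd h hne
    · exact ⟨hne, h⟩
  · rintro ⟨hne, h⟩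
    exact ⟨Or.inr h, hne⟩

-- ---- B side: the worklist computes exactly {nt ≠ '' | NulP nt} ----

-- symbols of subs not yet known nullable (processed = nl minus the pending stack)
def remN (nl stk subs : List String) : Nat :=
  subs.countP (fun s => decide (s ≠ "" ∧ (s ∉ nl ∨ s ∈ stk)))

lemma remN_push (nl stk subs : List String) (x : String) (hx : x ∉ nl) :
    remN (nl ++ [x]) (stk ++ [x]) subs = remN nl stk subs := by
  unfold remN
  apply List.countP_congr
  intro s _
  by_cases hsx : s = x
  · subst hsx
    simp [hx]
  · simp [List.mem_append, hsx]

lemma remN_pop (nl stk subs : List String) (s : String)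
    (hnl : s ∈ nl) (hstk : s ∉ stk) (hne : s ≠ "") :
    remN nl (stk ++ [s]) subs = remN nl stk subs + subs.count s := by
  induction subs with
  | nil => rfl
  | cons t subs ih =>
    unfold remN at ih ⊢
    rw [List.countP_cons, List.countP_cons, List.count_cons, ih]
    by_cases hts : t = s
    · have e1 : decide (t ≠ "" ∧ (t ∉ nl ∨ t ∈ stk ++ [s])) = true := by
        subst hts; simp [hne, hnl]
      have e2 : decide (t ≠ "" ∧ (t ∉ nl ∨ t ∈ stk)) = false := by
        subst hts; simp [hne, hnl, hstk]
      have e3 : (t == s) = true := beq_iff_eq.mpr hts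
      rw [e1, e2, e3]
      simp
      omega
    · have e1 : decide (t ≠ "" ∧ (t ∉ nl ∨ t ∈ stk ++ [s]))
          = decide (t ≠ "" ∧ (t ∉ nl ∨ t ∈ stk)) := by
        rw [decide_eq_decide]
        simp [List.mem_append, hts]
      have e3 : (t == s) = false := beq_eq_false_iff_ne.mpr hts
      rw [e1, e3]
      simp
      omega

-- properties of the occurrence index lists built in phase 1
def OccInv (G : List (String × List String)) (occ : PySem.Dict String (List Nat)) : Prop :=
  (∀ (s : String) (j : Nat), j ∈ occ.getD s [] → j < G.length) ∧
  (∀ (s : String) (j : Nat), (h : j < G.length) → s ≠ "" →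
      (occ.getD s []).count j = (G[j].2).count s)

-- invariant after phase 1 has processed the first k rules
def Inv1 (G : List (String × List String)) (k : Nat)
    (st : Nat × List String × PySem.Dict String (List Nat) × List Int × List String) : Prop :=
  st.1 = k ∧
  st.2.2.2.2 = st.2.1 ∧
  st.2.1.Nodup ∧
  (∀ x ∈ st.2.1, x ≠ "" ∧ NulP G x ∧ x ∈ G.map Prod.fst) ∧
  st.2.2.2.1.length = k ∧
  (∀ i : Nat, (h : i < G.length) → i < k →
      st.2.2.2.1.getD i 0 = ((G[i].2.countP (fun s => !(s == ""))) : Int)) ∧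
  (∀ i : Nat, (h : i < G.length) → i < k → st.2.2.2.1.getD i 0 = 0 →
      G[i].1 = "" ∨ G[i].1 ∈ st.2.1) ∧
  (∀ (s : String) (j : Nat), j ∈ st.2.2.1.getD s [] → j < k) ∧
  (∀ (s : String) (j : Nat), (h : j < G.length) → s ≠ "" →
      (st.2.2.1.getD s []).count j = if j < k then (G[j].2).count s else 0)

lemma getD_append_lt {α : Type} (l : List α) (x : α) (d : α) (j : Nat) (h : j < l.length) :
    (l ++ [x]).getD j d = l.getD j d := by
  rw [List.getD_eq_getElem?_getD, List.getD_eq_getElem?_getD, List.getElem?_append_left h]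

lemma getD_append_self {α : Type} (l : List α) (x : α) (d : α) :
    (l ++ [x]).getD l.length d = x := by
  rw [List.getD_eq_getElem?_getD, List.getElem?_append_right (le_refl _)]
  simp

-- the inner per-rule fold of phase 1: counts non-ε symbols and records occurrences
lemma bInitInner (i : Nat) (subs : List String) :
    ∀ (c : Int) (occ : PySem.Dict String (List Nat)),
    (subs.foldl (fun (q : Int × PySem.Dict String (List Nat)) s =>
        if !(s == "") then (q.1 + 1, q.2.modify s [] (· ++ [i])) else q) (c, occ)).1
      = c + (subs.countP (fun s => !(s == "")) : Int) ∧
    ∀ t : String,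
      (subs.foldl (fun (q : Int × PySem.Dict String (List Nat)) s =>
          if !(s == "") then (q.1 + 1, q.2.modify s [] (· ++ [i])) else q) (c, occ)).2.getD t []
        = occ.getD t [] ++ List.replicate (if t = "" then 0 else subs.count t) i := by
  induction subs with
  | nil =>
    intro c occ
    constructor
    · simp
    · intro t
      simp
  | cons s subs ih =>
    intro c occ
    rw [List.foldl_cons]
    rw [show (if (!(s == "")) = true then
          ((c, occ).1 + 1, (c, occ).2.modify s [] (· ++ [i])) else (c, occ))
        = if (!(s == "")) = true then (c + 1, occ.modify s [] (· ++ [i])) else (c, occ) from rfl]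
    by_cases hs : s = ""
    · rw [if_neg (by simp [hs])]
      obtain ⟨ih1, ih2⟩ := ih c occ
      refine ⟨by rw [ih1]; simp [hs], fun t => ?_⟩
      rw [ih2 t]
      by_cases ht : t = ""
      · simp [ht]
      · have hst : ¬ s = t := fun h => ht (hs ▸ h.symm)
        simp [ht, hst]
    · have hbe : (!(s == "")) = true := by simp [hs]
      rw [if_pos hbe]
      obtain ⟨ih1, ih2⟩ := ih (c + 1) (occ.modify s [] (· ++ [i]))
      constructor
      · rw [ih1]
        have : (s :: subs).countP (fun s => !(s == "")) = subs.countP (fun s => !(s == "")) + 1 := by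
          rw [List.countP_cons]
          simp [hbe]
        rw [this]
        push_cast
        ring
      · intro t
        rw [ih2 t, PySem.Dict.getD_modify]
        by_cases hts : t = s
        · subst hts
          rw [if_pos rfl]
          have h1 : (t :: subs).count t = subs.count t + 1 := List.count_cons_self ..
          rw [h1]
          simp only [hs, if_false, List.append_assoc]
          rw [List.singleton_append, ← List.replicate_succ]
        · rw [if_neg hts]
          have h1 : (s :: subs).count t = subs.count t := by
            rw [List.count_cons]
            simp [Ne.symm hts]
          rw [h1]

-- one phase-1 step preserves the invariant
lemma bInitStep_inv (G pre R : List (String × List String)) (r : String × List String)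
    (hG : G = pre ++ r :: R)
    (st : Nat × List String × PySem.Dict String (List Nat) × List Int × List String)
    (h : Inv1 G pre.length st) :
    Inv1 G (pre.length + 1) (bInitStep st r) := by
  obtain ⟨k, nl, occ, cnt, stk⟩ := st
  obtain ⟨hk, hstk, hnod, hsound, hlen, hcnt, hiv, hocc1, hocc2⟩ := h
  have hk' : k = pre.length := hk
  have hstk' : stk = nl := hstk
  have hnod' : nl.Nodup := hnod
  have hsound' : ∀ x ∈ nl, x ≠ "" ∧ NulP G x ∧ x ∈ G.map Prod.fst := hsound
  have hlen' : cnt.length = pre.length := hlen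
  have hcnt' : ∀ i : Nat, (h : i < G.length) → i < pre.length →
      cnt.getD i 0 = ((G[i].2.countP (fun s => !(s == ""))) : Int) := hcnt
  have hiv' : ∀ i : Nat, (h : i < G.length) → i < pre.length → cnt.getD i 0 = 0 →
      G[i].1 = "" ∨ G[i].1 ∈ nl := hiv
  have hocc1' : ∀ (s : String) (j : Nat), j ∈ occ.getD s [] → j < pre.length := hocc1
  have hocc2' : ∀ (s : String) (j : Nat), (h : j < G.length) → s ≠ "" →
      (occ.getD s []).count j = if j < pre.length then (G[j].2).count s else 0 := hocc2
  clear hk hstk hnod hsound hlen hcnt hiv hocc1 hocc2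
  subst hk'
  have hkG : pre.length < G.length := by rw [hG]; simp
  have hGk : G[pre.length] = r := by
    rw [List.getElem_of_eq hG, List.getElem_append_right (le_refl pre.length)]
    simp
  have hrG : r ∈ G := by
    rw [hG]
    exact List.mem_append_right _ (List.mem_cons_self ..)
  have hr1h : r.1 ∈ G.map Prod.fst := List.mem_map.mpr ⟨r, hrG, rfl⟩
  obtain ⟨hq1, hq2⟩ := bInitInner pre.length r.2 0 occ
  rw [zero_add] at hq1
  set Q := r.2.foldl (fun (q : Int × PySem.Dict String (List Nat)) s =>
      if !(s == "") then (q.1 + 1, q.2.modify s [] (· ++ [pre.length])) else q) (0, occ) with hQ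
  have hstepeq : bInitStep (pre.length, nl, occ, cnt, stk) r
      = if Q.1 == (0 : Int) && !(r.1 == "") && !(nl.contains r.1) then
          (pre.length + 1, PySem.Set.add nl r.1, Q.2, cnt ++ [Q.1], stk ++ [r.1])
        else (pre.length + 1, nl, Q.2, cnt ++ [Q.1], stk) := rfl
  rw [hstepeq]
  have hO1 : ∀ (s : String) (j : Nat), j ∈ Q.2.getD s [] → j < pre.length + 1 := by
    intro s j hj
    rw [hq2 s] at hj
    rcases List.mem_append.mp hj with hj | hj
    · exact Nat.lt_succ_of_lt (hocc1' s j hj)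
    · rw [List.eq_of_mem_replicate hj]
      omega
  have hO2 : ∀ (s : String) (j : Nat), (h : j < G.length) → s ≠ "" →
      (Q.2.getD s []).count j = if j < pre.length + 1 then (G[j].2).count s else 0 := by
    intro s j hj hs
    rw [hq2 s, List.count_append, hocc2' s j hj hs, List.count_replicate, if_neg hs]
    by_cases heq : j = pre.length
    · subst heq
      simp [hGk]
    · have e2 : (pre.length == j) = false := by simp [Ne.symm heq]
      rw [e2]
      by_cases hlt : j < pre.length
      · simp [hlt, Nat.lt_succ_of_lt hlt]
      · have h3 : ¬ j < pre.length + 1 := by omega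
        rw [if_neg hlt, if_neg h3]
        simp
  have hC : ∀ i : Nat, (h : i < G.length) → i < pre.length + 1 →
      (cnt ++ [Q.1]).getD i 0 = ((G[i].2.countP (fun s => !(s == ""))) : Int) := by
    intro i hiG hik
    by_cases hi : i < pre.length
    · rw [getD_append_lt cnt Q.1 0 i (by omega)]
      exact hcnt' i hiG hi
    · have hie : i = pre.length := by omega
      subst hie
      have hv : (cnt ++ [Q.1]).getD pre.length 0 = Q.1 := by
        conv_lhs => rw [← hlen']
        exact getD_append_self cnt Q.1 0
      rw [hv, hq1, hGk]
  have hlen2 : (cnt ++ [Q.1]).length = pre.length + 1 := by simp [hlen']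
  by_cases hcond : (Q.1 == (0 : Int) && !(r.1 == "") && !(nl.contains r.1)) = true
  · rw [if_pos hcond]
    rw [Bool.and_eq_true, Bool.and_eq_true] at hcond
    obtain ⟨⟨hb0, hbne⟩, hbnl⟩ := hcond
    have hq0 : Q.1 = 0 := beq_iff_eq.mp hb0
    have hr1ne : r.1 ≠ "" := by
      rw [Bool.not_eq_true'] at hbne
      exact beq_eq_false_iff_ne.mp hbne
    have hr1nl : r.1 ∉ nl := by
      rw [Bool.not_eq_true'] at hbnl
      intro hm
      rw [← List.contains_iff_mem] at hm
      rw [hbnl] at hm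
      exact Bool.false_ne_true hm
    have hAdd : PySem.Set.add nl r.1 = nl ++ [r.1] := PySem.Set.add_of_not_mem hr1nl
    have hNul : NulP G r.1 := by
      have hc0 : r.2.countP (fun s => !(s == "")) = 0 := by
        have := hq1 ▸ hq0
        exact_mod_cast this
      refine NulP.step (by simpa using hrG) ?_
      intro s hs
      have := List.countP_eq_zero.mp hc0 s hs
      have hse : s = "" := by simpa using this
      rw [hse]
      exact NulP.base
    refine ⟨rfl, ?_, ?_, ?_, ?_, ?_, ?_, ?_, ?_⟩
    · show stk ++ [r.1] = PySem.Set.add nl r.1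
      rw [hstk', hAdd]
    · show (PySem.Set.add nl r.1).Nodup
      rw [hAdd]
      refine hnod'.append (List.nodup_singleton _) ?_
      intro a ha hb
      rw [List.mem_singleton] at hb
      subst hb
      exact hr1nl ha
    · show ∀ x ∈ PySem.Set.add nl r.1, x ≠ "" ∧ NulP G x ∧ x ∈ G.map Prod.fst
      rw [hAdd]
      intro x hx
      rcases List.mem_append.mp hx with hx | hx
      · exact hsound' x hx
      · rw [List.mem_singleton] at hx
        subst hx
        exact ⟨hr1ne, hNul, hr1h⟩
    · exact hlen2
    · exact hC
    · show ∀ i : Nat, (h : i < G.length) → i < pre.length + 1 →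
          (cnt ++ [Q.1]).getD i 0 = 0 → G[i].1 = "" ∨ G[i].1 ∈ PySem.Set.add nl r.1
      intro i hiG hik h0
      rw [hAdd]
      by_cases hi : i < pre.length
      · rw [getD_append_lt cnt Q.1 0 i (by omega)] at h0
        rcases hiv' i hiG hi h0 with h | h
        · exact Or.inl h
        · exact Or.inr (List.mem_append_left _ h)
      · have hie : i = pre.length := by omega
        subst hie
        rw [hGk]
        exact Or.inr (List.mem_append_right _ (List.mem_singleton.mpr rfl))
    · exact hO1
    · exact hO2
  · rw [if_neg hcond]
    refine ⟨rfl, hstk', hnod', hsound', hlen2, hC, ?_, hO1, hO2⟩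
    show ∀ i : Nat, (h : i < G.length) → i < pre.length + 1 →
        (cnt ++ [Q.1]).getD i 0 = 0 → G[i].1 = "" ∨ G[i].1 ∈ nl
    intro i hiG hik h0
    by_cases hi : i < pre.length
    · rw [getD_append_lt cnt Q.1 0 i (by omega)] at h0
      exact hiv' i hiG hi h0
    · have hie : i = pre.length := by omega
      subst hie
      have hv : (cnt ++ [Q.1]).getD pre.length 0 = Q.1 := by
        conv_lhs => rw [← hlen']
        exact getD_append_self cnt Q.1 0
      rw [hv] at h0
      rw [hGk]
      by_cases hre : r.1 = ""
      · exact Or.inl hre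
      · right
        by_contra hnm
        apply hcond
        rw [Bool.and_eq_true, Bool.and_eq_true]
        refine ⟨⟨beq_iff_eq.mpr h0, ?_⟩, ?_⟩
        · rw [Bool.not_eq_true']
          exact beq_eq_false_iff_ne.mpr hre
        · rw [Bool.not_eq_true']
          exact Bool.eq_false_iff.mpr fun hc => hnm (List.contains_iff_mem.mp hc)

lemma bInit_go (G : List (String × List String)) :
    ∀ (R pre : List (String × List String))
      (st : Nat × List String × PySem.Dict String (List Nat) × List Int × List String),
    G = pre ++ R → Inv1 G pre.length st →
    Inv1 G (pre.length + R.length) (R.foldl bInitStep st) := by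
  intro R
  induction R with
  | nil =>
    intro pre st hG hInv
    simpa using hInv
  | cons r R ih =>
    intro pre st hG hInv
    have h1 := bInitStep_inv G pre R r hG st hInv
    have hG' : G = (pre ++ [r]) ++ R := by simp [hG]
    have h2 := ih (pre ++ [r]) (bInitStep st r) hG' (by simpa using h1)
    rw [List.foldl_cons]
    have : pre.length + (r :: R).length = (pre ++ [r]).length + R.length := by
      simp
      omega
    rw [this]
    exact h2

lemma bInit_inv (G : List (String × List String)) : Inv1 G G.length (bInit G) := by
  have hInit : Inv1 G 0 ((0 : Nat), ([] : List String), PySem.Dict.empty,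
      ([] : List Int), ([] : List String)) := by
    refine ⟨rfl, rfl, List.nodup_nil, by simp, rfl, by omega, by omega, ?_, ?_⟩
    · intro s j hj
      rw [PySem.Dict.getD_empty] at hj
      exact absurd hj (List.not_mem_nil)
    · intro s j hj hs
      rw [PySem.Dict.getD_empty]
      simp
  have := bInit_go G G [] ((0 : Nat), ([] : List String), PySem.Dict.empty,
      ([] : List Int), ([] : List String)) rfl hInit
  simpa [bInit] using this

lemma remN_eq_zero_iff (nl stk subs : List String) :
    remN nl stk subs = 0 ↔ ∀ t ∈ subs, t = "" ∨ (t ∈ nl ∧ t ∉ stk) := by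
  unfold remN
  rw [List.countP_eq_zero]
  constructor
  · intro h t ht
    have h2 := h t ht
    by_cases hte : t = ""
    · exact Or.inl hte
    · right
      simp only [decide_eq_true_eq, not_and, not_or] at h2
      rcases Decidable.em (t ∈ nl) with h3 | h3
      · rcases Decidable.em (t ∈ stk) with h4 | h4
        · exact absurd (h2 hte) (by simp [h3, h4])
        · exact ⟨h3, h4⟩
      · exact absurd (h2 hte) (by simp [h3])
  · intro h t ht
    simp only [decide_eq_true_eq, not_and, not_or]
    intro hne
    rcases h t ht with h1 | h1
    · exact absurd h1 hne
    · simp [h1.1, h1.2]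

lemma remN_self (nl subs : List String) :
    remN nl nl subs = subs.countP (fun s => !(s == "")) := by
  unfold remN
  apply List.countP_congr
  intro s _
  by_cases hs : s = "" <;> by_cases hm : s ∈ nl <;> simp [hs, hm]

lemma getD_set_eq (cnt : List Int) (i : Nat) (c : Int) (h : i < cnt.length) :
    (cnt.set i c).getD i 0 = c := by
  rw [List.getD_eq_getElem?_getD, List.getElem?_set_self h]
  rfl

lemma getD_set_ne (cnt : List Int) (i j : Nat) (c : Int) (h : i ≠ j) :
    (cnt.set i c).getD j 0 = cnt.getD j 0 := by
  rw [List.getD_eq_getElem?_getD, List.getElem?_set_ne h, ← List.getD_eq_getElem?_getD]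

lemma card_push (G : List (String × List String)) (nl : List String) (nt : String)
    (h1 : nt ∈ G.map Prod.fst) (h2 : nt ∉ nl) :
    (headsF G \ (nl ++ [nt]).toFinset).card + 1 = (headsF G \ nl.toFinset).card := by
  have hins : (nl ++ [nt]).toFinset = insert nt nl.toFinset := by simp
  rw [hins]
  have h3 : headsF G \ insert nt nl.toFinset = (headsF G \ nl.toFinset).erase nt := by
    ext y
    simp only [Finset.mem_sdiff, Finset.mem_erase, Finset.mem_insert]
    tauto
  rw [h3]
  apply Finset.card_erase_add_one
  rw [Finset.mem_sdiff]
  refine ⟨?_, fun hm => h2 (List.mem_toFinset.mp hm)⟩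
  unfold headsF
  exact List.mem_toFinset.mpr h1

-- the inner worklist fold preserves the invariant and the measure
lemma bInner_go (G : List (String × List String)) :
    ∀ (l : List Nat) (nl : List String) (cnt : List Int) (stk : List String),
    (∀ i ∈ l, i < G.length) →
    (∀ i : Nat, (h : i < G.length) →
        cnt.getD i 0 = (remN nl stk G[i].2 : Int) + (l.count i : Int)) →
    cnt.length = G.length →
    stk.Nodup →
    (∀ x ∈ stk, x ∈ nl) →
    nl.Nodup →
    (∀ x ∈ nl, x ≠ "" ∧ NulP G x ∧ x ∈ G.map Prod.fst) →
    (∀ i : Nat, (h : i < G.length) → cnt.getD i 0 = 0 → G[i].1 = "" ∨ G[i].1 ∈ nl) →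
    (∀ i : Nat, (h : i < G.length) →
        (bInner G l (nl, cnt, stk)).2.1.getD i 0
          = (remN (bInner G l (nl, cnt, stk)).1 (bInner G l (nl, cnt, stk)).2.2 G[i].2 : Int)) ∧
    (bInner G l (nl, cnt, stk)).2.1.length = G.length ∧
    (bInner G l (nl, cnt, stk)).2.2.Nodup ∧
    (∀ x ∈ (bInner G l (nl, cnt, stk)).2.2, x ∈ (bInner G l (nl, cnt, stk)).1) ∧
    (bInner G l (nl, cnt, stk)).1.Nodup ∧
    (∀ x ∈ (bInner G l (nl, cnt, stk)).1, x ≠ "" ∧ NulP G x ∧ x ∈ G.map Prod.fst) ∧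
    (∀ i : Nat, (h : i < G.length) → (bInner G l (nl, cnt, stk)).2.1.getD i 0 = 0 →
        G[i].1 = "" ∨ G[i].1 ∈ (bInner G l (nl, cnt, stk)).1) ∧
    (∀ x ∈ nl, x ∈ (bInner G l (nl, cnt, stk)).1) ∧
    (bInner G l (nl, cnt, stk)).2.2.length
        + (headsF G \ (bInner G l (nl, cnt, stk)).1.toFinset).card
      = stk.length + (headsF G \ nl.toFinset).card := by
  intro l
  induction l with
  | nil =>
    intro nl cnt stk hl hcnt hlen hnodstk hstknl hnodnl hsound hiv
    refine ⟨?_, hlen, hnodstk, hstknl, hnodnl, hsound, hiv, fun x hx => hx, rfl⟩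
    intro i h
    have h2 := hcnt i h
    simpa using h2
  | cons i l ih =>
    intro nl cnt stk hl hcnt hlen hnodstk hstknl hnodnl hsound hiv
    have hiG : i < G.length := hl i (List.mem_cons_self ..)
    have hred : bInner G (i :: l) (nl, cnt, stk) = bInner G l (bInnerStep G (nl, cnt, stk) i) := rfl
    rw [hred]
    set c : Int := cnt.getD i 0 - 1 with hc
    have hcval : c = (remN nl stk G[i].2 : Int) + (l.count i : Int) := by
      rw [hc, hcnt i hiG, List.count_cons_self]
      push_cast
      ring
    have hsetD : ∀ j : Nat, (cnt.set i c).getD j 0 = if j = i then c else cnt.getD j 0 := by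
      intro j
      by_cases hji : j = i
      · subst hji
        rw [if_pos rfl]
        exact getD_set_eq cnt j c (by omega)
      · rw [if_neg hji]
        exact getD_set_ne cnt i j c (fun h => hji h.symm)
    have hlen2 : (cnt.set i c).length = G.length := by simp [hlen]
    have hcnt2 : ∀ j : Nat, (h : j < G.length) →
        (cnt.set i c).getD j 0 = (remN nl stk G[j].2 : Int) + (l.count j : Int) := by
      intro j hj
      rw [hsetD j]
      by_cases hji : j = i
      · subst hji
        rw [if_pos rfl]
        exact hcval
      · rw [if_neg hji, hcnt j hj, List.count_cons]
        have he : (i == j) = false := beq_eq_false_iff_ne.mpr (fun h => hji h.symm)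
        rw [he]
        simp
    set NT : String := (G.getD i ("", [])).1 with hNT
    have hNTval : NT = G[i].1 := by
      rw [hNT, List.getD_eq_getElem G ("", []) hiG]
    have hNTh : NT ∈ G.map Prod.fst := by
      rw [hNTval]
      exact List.mem_map.mpr ⟨G[i], List.getElem_mem hiG, rfl⟩
    have hstep : bInnerStep G (nl, cnt, stk) i
        = if c == (0 : Int) then
            (if !(NT == "") && !(nl.contains NT) then
              (PySem.Set.add nl NT, cnt.set i c, stk ++ [NT])
            else (nl, cnt.set i c, stk))
          else (nl, cnt.set i c, stk) := rfl
    by_cases hc0 : (c == (0 : Int)) = true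
    · have hc0' : c = 0 := beq_iff_eq.mp hc0
      have hrem0 : remN nl stk G[i].2 = 0 ∧ l.count i = 0 := by
        have := hcval
        constructor <;> omega
      have hsubs : ∀ t ∈ G[i].2, t = "" ∨ (t ∈ nl ∧ t ∉ stk) :=
        (remN_eq_zero_iff nl stk (G[i].2)).mp hrem0.1
      have hNul : NulP G (G[i].1) := by
        refine NulP.step (nt := G[i].1) (subs := G[i].2) ?_ ?_
        · rw [Prod.mk.eta]
          exact List.getElem_mem hiG
        · intro t ht
          rcases hsubs t ht with h | h
          · rw [h]
            exact NulP.base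
          · exact (hsound t h.1).2.1
      rw [hstep, if_pos hc0]
      by_cases hpush : (!(NT == "") && !(nl.contains NT)) = true
      · rw [if_pos hpush]
        rw [Bool.and_eq_true] at hpush
        obtain ⟨hp1, hp2⟩ := hpush
        have hNTne : NT ≠ "" := by
          rw [Bool.not_eq_true'] at hp1
          exact beq_eq_false_iff_ne.mp hp1
        have hNTnl : NT ∉ nl := by
          rw [Bool.not_eq_true'] at hp2
          intro hm
          rw [← List.contains_iff_mem] at hm
          rw [hp2] at hm
          exact Bool.false_ne_true hm
        have hNTstk : NT ∉ stk := fun hm => hNTnl (hstknl NT hm)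
        have hAdd : PySem.Set.add nl NT = nl ++ [NT] := PySem.Set.add_of_not_mem hNTnl
        rw [hAdd]
        obtain ⟨C1, C2, C3, C4, C5, C6, C7, C8, C9⟩ :=
          ih (nl ++ [NT]) (cnt.set i c) (stk ++ [NT])
            (fun j hj => hl j (List.mem_cons_of_mem _ hj))
            (by
              intro j hj
              rw [remN_push nl stk (G[j].2) NT hNTnl]
              exact hcnt2 j hj)
            hlen2
            (by
              refine hnodstk.append (List.nodup_singleton _) ?_
              intro a ha hb
              rw [List.mem_singleton] at hb
              subst hb
              exact hNTstk ha)
            (by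
              intro x hx
              rcases List.mem_append.mp hx with hx | hx
              · exact List.mem_append_left _ (hstknl x hx)
              · exact List.mem_append_right _ hx)
            (by
              refine hnodnl.append (List.nodup_singleton _) ?_
              intro a ha hb
              rw [List.mem_singleton] at hb
              subst hb
              exact hNTnl ha)
            (by
              intro x hx
              rcases List.mem_append.mp hx with hx | hx
              · exact hsound x hx
              · rw [List.mem_singleton] at hx
                subst hx
                exact ⟨hNTne, hNTval ▸ hNul, hNTh⟩)
            (by
              intro j hj h0
              rw [hsetD j] at h0
              by_cases hji : j = i
              · subst hji
                right
                rw [← hNTval]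
                exact List.mem_append_right _ (List.mem_singleton.mpr rfl)
              · rw [if_neg hji] at h0
                rcases hiv j hj h0 with h | h
                · exact Or.inl h
                · exact Or.inr (List.mem_append_left _ h))
        refine ⟨C1, C2, C3, C4, C5, C6, C7,
          fun x hx => C8 x (List.mem_append_left _ hx), ?_⟩
        have hcp := card_push G nl NT hNTh hNTnl
        rw [List.length_append, List.length_singleton] at C9
        omega
      · rw [if_neg hpush]
        have hdone : NT = "" ∨ NT ∈ nl := by
          rcases Decidable.em (NT = "") with h | h
          · exact Or.inl h
          · right
            by_contra hnm
            apply hpush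
            rw [Bool.and_eq_true]
            constructor
            · rw [Bool.not_eq_true']
              exact beq_eq_false_iff_ne.mpr h
            · rw [Bool.not_eq_true']
              exact Bool.eq_false_iff.mpr fun hcn => hnm (List.contains_iff_mem.mp hcn)
        exact ih nl (cnt.set i c) stk
          (fun j hj => hl j (List.mem_cons_of_mem _ hj))
          hcnt2 hlen2 hnodstk hstknl hnodnl hsound
          (by
            intro j hj h0
            rw [hsetD j] at h0
            by_cases hji : j = i
            · subst hji
              rw [← hNTval]
              exact hdone
            · rw [if_neg hji] at h0
              exact hiv j hj h0)
    · rw [hstep, if_neg hc0]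
      exact ih nl (cnt.set i c) stk
        (fun j hj => hl j (List.mem_cons_of_mem _ hj))
        hcnt2 hlen2 hnodstk hstknl hnodnl hsound
        (by
          intro j hj h0
          rw [hsetD j] at h0
          by_cases hji : j = i
          · subst hji
            rw [if_pos rfl] at h0
            exact absurd (beq_iff_eq.mpr h0) hc0
          · rw [if_neg hji] at h0
            exact hiv j hj h0)

-- the outer worklist loop: its result is sound and closed under the rules
lemma bLoop_go (G : List (String × List String)) (occ : PySem.Dict String (List Nat))
    (hocc1 : ∀ (s : String) (j : Nat), j ∈ occ.getD s [] → j < G.length)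
    (hocc2 : ∀ (s : String) (j : Nat), (h : j < G.length) → s ≠ "" →
        (occ.getD s []).count j = (G[j].2).count s) :
    ∀ (f : Nat) (nl : List String) (cnt : List Int) (stk : List String),
    stk.Nodup →
    (∀ x ∈ stk, x ∈ nl) →
    nl.Nodup →
    (∀ x ∈ nl, x ≠ "" ∧ NulP G x ∧ x ∈ G.map Prod.fst) →
    cnt.length = G.length →
    (∀ i : Nat, (h : i < G.length) → cnt.getD i 0 = (remN nl stk G[i].2 : Int)) →
    (∀ i : Nat, (h : i < G.length) → cnt.getD i 0 = 0 → G[i].1 = "" ∨ G[i].1 ∈ nl) →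
    stk.length + (headsF G \ nl.toFinset).card < f →
    (∀ x ∈ nl, x ∈ bLoop G occ f (nl, cnt, stk)) ∧
    (∀ x ∈ bLoop G occ f (nl, cnt, stk), x ≠ "" ∧ NulP G x) ∧
    (∀ i : Nat, (h : i < G.length) →
        (∀ t ∈ G[i].2, t = "" ∨ t ∈ bLoop G occ f (nl, cnt, stk)) →
        (G[i].1 = "" ∨ G[i].1 ∈ bLoop G occ f (nl, cnt, stk))) := by
  intro f
  induction f with
  | zero =>
    intro nl cnt stk _ _ _ _ _ _ _ hfuel
    omega
  | succ f ih =>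
    intro nl cnt stk hnodstk hstknl hnodnl hsound hlen hcnt hiv hfuel
    rcases List.eq_nil_or_concat' stk with rfl | ⟨stk', s, rfl⟩
    · have hred : bLoop G occ (f + 1) (nl, cnt, ([] : List String)) = nl := rfl
      rw [hred]
      refine ⟨fun x hx => hx, fun x hx => ⟨(hsound x hx).1, (hsound x hx).2.1⟩, ?_⟩
      intro i h hall
      apply hiv i h
      rw [hcnt i h]
      have : remN nl [] (G[i].2) = 0 := by
        rw [remN_eq_zero_iff]
        intro t ht
        rcases hall t ht with h1 | h1
        · exact Or.inl h1
        · exact Or.inr ⟨h1, List.not_mem_nil⟩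
      rw [this]
      rfl
    · have hred : bLoop G occ (f + 1) (nl, cnt, stk' ++ [s])
          = if (stk' ++ [s]).isEmpty then nl
            else bLoop G occ f
              (bInner G (occ.getD ((stk' ++ [s]).getLastD "") [])
                (nl, cnt, (stk' ++ [s]).dropLast)) := rfl
      rw [hred, if_neg (by simp), List.getLastD_concat, List.dropLast_concat]
      have hs_nl : s ∈ nl := hstknl s (List.mem_append_right _ (List.mem_singleton.mpr rfl))
      have hsne : s ≠ "" := (hsound s hs_nl).1
      have hnd2 : (s :: stk').Nodup := by
        have hp : ([s] ++ stk').Nodup := List.nodup_append_comm.mp hnodstk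
        simpa using hp
      have hnod1 : stk'.Nodup := (List.nodup_cons.mp hnd2).2
      have hs_stk' : s ∉ stk' := (List.nodup_cons.mp hnd2).1
      have hstk'nl : ∀ x ∈ stk', x ∈ nl := fun x hx => hstknl x (List.mem_append_left _ hx)
      obtain ⟨C1, C2, C3, C4, C5, C6, C7, C8, C9⟩ :=
        bInner_go G (occ.getD s []) nl cnt stk'
          (fun j hj => hocc1 s j hj)
          (by
            intro j hj
            rw [hcnt j hj, remN_pop nl stk' (G[j].2) s hs_nl hs_stk' hsne, hocc2 s j hj hsne]
            push_cast
            ring)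
          hlen hnod1 hstk'nl hnodnl hsound
          (fun i h h0 => hiv i h h0)
      obtain ⟨D1, D2, D3⟩ :=
        ih (bInner G (occ.getD s []) (nl, cnt, stk')).1
          (bInner G (occ.getD s []) (nl, cnt, stk')).2.1
          (bInner G (occ.getD s []) (nl, cnt, stk')).2.2
          C3 C4 C5 C6 C2 C1 C7
          (by
            rw [List.length_append, List.length_singleton] at hfuel
            omega)
      exact ⟨fun x hx => D1 x (C8 x hx), D2, D3⟩

-- membership in B's final nullable set
lemma mem_bnull (G : List (String × List String)) (x : String) :
    x ∈ bLoop G (bInit G).2.2.1 (G.length + 1)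
        ((bInit G).2.1, (bInit G).2.2.2.1, (bInit G).2.2.2.2) ↔ (x ≠ "" ∧ NulP G x) := by
  obtain ⟨h1, h2, h3, h4, h5, h6, h7, h8, h9⟩ := bInit_inv G
  have hstk : (bInit G).2.2.2.2 = (bInit G).2.1 := h2
  have hcnt : ∀ i : Nat, (h : i < G.length) →
      (bInit G).2.2.2.1.getD i 0
        = (remN (bInit G).2.1 (bInit G).2.2.2.2 (G[i].2) : Int) := by
    intro i h
    rw [hstk, remN_self, h6 i h h]
  have hocc2 : ∀ (s : String) (j : Nat), (h : j < G.length) → s ≠ "" →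
      ((bInit G).2.2.1.getD s []).count j = (G[j].2).count s := by
    intro s j h hs
    rw [h9 s j h hs, if_pos h]
  have hsub : (bInit G).2.1.toFinset ⊆ headsF G := by
    intro y hy
    unfold headsF
    rw [List.mem_toFinset] at hy ⊢
    exact (h4 y hy).2.2
  have hfuel : (bInit G).2.2.2.2.length + (headsF G \ (bInit G).2.1.toFinset).card
      < G.length + 1 := by
    have e1 : (bInit G).2.1.toFinset.card = (bInit G).2.1.length :=
      List.toFinset_card_of_nodup h3
    have e2 : (headsF G \ (bInit G).2.1.toFinset).card
        = (headsF G).card - (bInit G).2.1.toFinset.card := by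
      rw [Finset.card_sdiff, Finset.inter_eq_left.mpr hsub]
    have e3 : (bInit G).2.1.toFinset.card ≤ (headsF G).card := Finset.card_le_card hsub
    have e4 : (headsF G).card ≤ G.length := by
      have := List.toFinset_card_le (G.map Prod.fst)
      rw [List.length_map] at this
      exact this
    have e5 : (bInit G).2.2.2.2.length = (bInit G).2.1.length := by rw [hstk]
    omega
  obtain ⟨P1, P2, P3⟩ := bLoop_go G (bInit G).2.2.1 h8 hocc2 (G.length + 1)
    (bInit G).2.1 (bInit G).2.2.2.1 (bInit G).2.2.2.2
    (hstk ▸ h3) (fun y hy => hstk ▸ hy) h3 h4 h5 hcnt (fun i h => h7 i h h) hfuel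
  constructor
  · exact P2 x
  · rintro ⟨hne, hnul⟩
    have main : ∀ y : String, NulP G y → y ≠ "" →
        y ∈ bLoop G (bInit G).2.2.1 (G.length + 1)
          ((bInit G).2.1, (bInit G).2.2.2.1, (bInit G).2.2.2.2) := by
      intro y hy
      induction hy with
      | base => intro h; exact absurd rfl h
      | @step nt subs hmem hsubs ihs =>
        intro hne2
        obtain ⟨i, hlt, hie⟩ := List.mem_iff_getElem.mp hmem
        have hi2 : G[i].2 = subs := by rw [hie]
        have hi1 : G[i].1 = nt := by rw [hie]
        have := P3 i hlt (by
          rw [hi2]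
          intro t ht
          by_cases hte : t = ""
          · exact Or.inl hte
          · exact Or.inr (ihs t ht hte))
        rw [hi1] at this
        rcases this with h | h
        · exact absurd h hne2
        · exact h
    exact main x hnul hne

lemma bExpand_congr (e1 e2 : List String) (h : ∀ x, x ∈ e1 ↔ x ∈ e2)
    (nt : String) (subs : List String) :
    bExpand e1 nt subs = bExpand e2 nt subs := by
  have hc : ∀ x, e1.contains x = e2.contains x := by
    intro x
    rw [Bool.eq_iff_iff, List.contains_iff_mem, List.contains_iff_mem]
    exact h x
  cases subs with
  | nil => rfl
  | cons a t =>
    cases t with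
    | nil => rfl
    | cons b t2 =>
      cases t2 with
      | nil =>
        show (if e1.contains a && !(nt == b) then [(nt, [b])] else []) ++
              (if e1.contains b && !(nt == a) then [(nt, [a])] else []) ++ [(nt, [a, b])]
            = (if e2.contains a && !(nt == b) then [(nt, [b])] else []) ++
              (if e2.contains b && !(nt == a) then [(nt, [a])] else []) ++ [(nt, [a, b])]
        rw [hc a, hc b]
      | cons c t3 => rfl

-- A's loop body appends exactly what Source B's expand produces for the rule
lemma stepA_eq (e : List String) (g : List (String × List String)) (nt : String)
    (subs : List String) :
    (if subs.length == 1 then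
       if !(subs.getD 0 "" == "") then g ++ [(nt, subs)] else g
     else if subs.length == 2 then
       let g1 := if e.contains (subs.getD 0 "") && !(nt == subs.getD 1 "") then
           g ++ [(nt, [subs.getD 1 ""])] else g
       let g2 := if e.contains (subs.getD 1 "") && !(nt == subs.getD 0 "") then
           g1 ++ [(nt, [subs.getD 0 ""])] else g1
       g2 ++ [(nt, subs)]
     else g)
    = g ++ bExpand e nt subs := by
  cases subs with
  | nil =>
    show g = g ++ ([] : List (String × List String))
    simp
  | cons a t =>
    cases t with
    | nil =>
      show (if !(a == "") then g ++ [(nt, [a])] else g)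
          = g ++ (if a == "" then [] else [(nt, [a])])
      by_cases ha : a = ""
      · simp [ha]
      · have hb : (a == "") = false := beq_eq_false_iff_ne.mpr ha
        rw [hb]
        simp
    | cons b t2 =>
      cases t2 with
      | nil =>
        show (let g1 := if e.contains a && !(nt == b) then g ++ [(nt, [b])] else g
              let g2 := if e.contains b && !(nt == a) then g1 ++ [(nt, [a])] else g1
              g2 ++ [(nt, [a, b])])
            = g ++ ((if e.contains a && !(nt == b) then [(nt, [b])] else []) ++
                (if e.contains b && !(nt == a) then [(nt, [a])] else []) ++ [(nt, [a, b])])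
        by_cases h1 : a ∈ e ∧ ¬nt = b <;> by_cases h2 : b ∈ e ∧ ¬nt = a <;>
          simp [h1, h2]
      | cons c t3 =>
        show g = g ++ ([] : List (String × List String))
        simp

theorem eliminate_e_rules_spec : Claim_equal_eliminate_e_rules := by
  unfold Claim_equal_eliminate_e_rules
  intro G _
  unfold Spec_eliminate_e_rules
  have hA : eliminate_e_rules G
      = G.foldl (fun grammar (r : String × List String) =>
          if r.2.length == 1 then
            if !(r.2.getD 0 "" == "") then grammar ++ [(r.1, r.2)] else grammar
          else if r.2.length == 2 then
            let g1 := if (reverseClosureE G).contains (r.2.getD 0 "") && !(r.1 == r.2.getD 1 "") then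
                grammar ++ [(r.1, [r.2.getD 1 ""])] else grammar
            let g2 := if (reverseClosureE G).contains (r.2.getD 1 "") && !(r.1 == r.2.getD 0 "") then
                g1 ++ [(r.1, [r.2.getD 0 ""])] else g1
            g2 ++ [(r.1, r.2)]
          else grammar) [] := rfl
  have hB : eliminate_e_rules_alt G
      = G.flatMap (fun r => bExpand (bLoop G (bInit G).2.2.1 (G.length + 1)
          ((bInit G).2.1, (bInit G).2.2.2.1, (bInit G).2.2.2.2)) r.1 r.2) := rfl
  rw [hA, hB]
  rw [List.foldl_ext
      (fun grammar (r : String × List String) =>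
          if r.2.length == 1 then
            if !(r.2.getD 0 "" == "") then grammar ++ [(r.1, r.2)] else grammar
          else if r.2.length == 2 then
            let g1 := if (reverseClosureE G).contains (r.2.getD 0 "") && !(r.1 == r.2.getD 1 "") then
                grammar ++ [(r.1, [r.2.getD 1 ""])] else grammar
            let g2 := if (reverseClosureE G).contains (r.2.getD 1 "") && !(r.1 == r.2.getD 0 "") then
                g1 ++ [(r.1, [r.2.getD 0 ""])] else g1
            g2 ++ [(r.1, r.2)]
          else grammar)
      (fun grammar (r : String × List String) =>
          grammar ++ bExpand (reverseClosureE G) r.1 r.2)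
      []
      (fun g r _ => stepA_eq (reverseClosureE G) g r.1 r.2)]
  rw [PySem.List.foldl_append_eq_flatMap, List.nil_append]
  have hmem : ∀ x, x ∈ reverseClosureE G ↔ x ∈ bLoop G (bInit G).2.2.1 (G.length + 1)
      ((bInit G).2.1, (bInit G).2.2.2.1, (bInit G).2.2.2.2) := by
    intro x
    rw [mem_e, mem_bnull]
  have hfun : (fun r : String × List String => bExpand (reverseClosureE G) r.1 r.2)
      = (fun r : String × List String => bExpand (bLoop G (bInit G).2.2.1 (G.length + 1)
          ((bInit G).2.1, (bInit G).2.2.2.1, (bInit G).2.2.2.2)) r.1 r.2) :=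
    funext fun r => bExpand_congr _ _ hmem r.1 r.2
  rw [hfun]
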